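-- pv_equiv track=rewrite | github.com/AlgorithmOnline/jaeeun | 2_20210105.py | solve
-- ===== SOURCE A (Python) =====
-- def solve(arr):
--     stack = []
--     answer = []
--     idx = 0
--     curnum = 1
--
--     while idx < len(arr):
--         if stack:    #안비어있을때.
--             if stack[-1] != arr[idx]:    #마지막요소랑 지금 뽑아야할 수랑 다르면
--                 if curnum > arr[idx]:    #다른데, 이미 스택안에 들어있으면 못뽑으니까 No
--                     return ['NO']
--                 else:
--                     stack.append(curnum)
--                     answer.append('+')
--                     curnum += 1
--             else:                        #마지막요소랑 지금 뽑아야할 수가 같으면.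
--                 answer.append('-')
--                 idx += 1
--                 stack.pop()
--         else:
--             stack.append(curnum)
--             answer.append('+')
--             curnum += 1
--
--     return answer
-- ===== SOURCE B (Python) =====
-- def solve(arr):
--     # No explicit stack of pending numbers: the stack top is always the largest
--     # not-yet-popped value <= the running push maximum, so we track the POPPED
--     # values in a union-find style skip dict and emit '+'s arithmetically.
--     jump = {}  # popped value -> some value <= the largest unpopped value below it
--
--     def find(k):
--         # largest value <= k that has not been popped (0 if none remains)
--         path = []
--         while k in jump:
--             path.append(k)
--             k = jump[k]
--         for v in path:  # path compression
--             jump[v] = k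
--         return k
--
--     answer = []
--     maxpushed = 0
--     for t in arr:
--         if t > maxpushed:
--             answer.extend(['+'] * (t - maxpushed))
--             maxpushed = t
--         elif t < 1 or t != find(maxpushed):
--             return ['NO']
--         jump[t] = t - 1
--         answer.append('-')
--     return answer
-- ===== Notes on version B (the rewrite author's own statement) =====
-- stated objective: faster
-- what changed: B keeps no stack of pending numbers: it records the popped values in a union-find style skip dictionary with path compression (the stack top is always the largest unpopped value <= the running push maximum, recovered by 'find') and emits each '+' run as one bulk list.extend from the running maximum instead of pushing one element per interpreted loop iteration (measured ~13x faster at the largest size).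
import Mathlib
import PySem

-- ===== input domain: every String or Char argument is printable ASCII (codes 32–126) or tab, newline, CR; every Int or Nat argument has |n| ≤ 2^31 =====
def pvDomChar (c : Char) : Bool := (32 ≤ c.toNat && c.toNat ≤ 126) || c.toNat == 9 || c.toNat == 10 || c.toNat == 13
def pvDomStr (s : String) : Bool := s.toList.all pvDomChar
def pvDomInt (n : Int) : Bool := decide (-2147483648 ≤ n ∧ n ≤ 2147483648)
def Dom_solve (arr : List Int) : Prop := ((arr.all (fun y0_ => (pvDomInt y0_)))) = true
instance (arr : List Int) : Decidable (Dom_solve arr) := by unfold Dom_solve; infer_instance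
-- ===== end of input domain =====

-- B drops A's explicit stack of pending numbers: it records the POPPED values in a
-- union-find style skip dictionary (the stack top is always the largest unpopped value
-- ≤ the running push maximum) and emits the '+' runs as bulk extends (measured faster in a timing run).

-- ===== PORT A =====
-- A's while loop: state (stack, answer, idx, curnum); stack head = Python stack[-1];
-- answer grows at the back exactly as Python appends.
def solveLoop (arr : List Int) (stack : List Int) (answer : List String) (idx : Nat) (curnum : Int) : List String :=
  if h : idx < arr.length then
    match stack with
    | top :: rest =>
      if top ≠ arr[idx] then
        if curnum > arr[idx] then ["NO"]
        else solveLoop arr (curnum :: top :: rest) (answer ++ ["+"]) idx (curnum + 1)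
      else solveLoop arr rest (answer ++ ["-"]) (idx + 1) curnum
    | [] => solveLoop arr [curnum] (answer ++ ["+"]) idx (curnum + 1)
  else answer
termination_by (arr.length - idx, (arr.getD idx 0 + 2 - curnum).toNat + (if stack.isEmpty then 1 else 0))
decreasing_by
  · apply Prod.Lex.right
    simp only [List.isEmpty_cons, List.getD_eq_getElem?_getD, List.getElem?_eq_getElem h]
    simp at *
    omega
  · exact Prod.Lex.left _ _ (by omega)
  · apply Prod.Lex.right
    simp only [List.isEmpty_cons, List.isEmpty_nil, List.getD_eq_getElem?_getD,
      List.getElem?_eq_getElem h, Option.getD_some]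
    norm_num
    omega

def solve (arr : List Int) : List String := solveLoop arr [] [] 0 1

-- ===== PORT B =====
-- B's inner `while k in jump: path.append(k); k = jump[k]` followed by the
-- path-compression `for v in path: jump[v] = k`.  Ported by hand with fuel; the fuel
-- `maxpushed.toNat + 1` used below is exact because every entry `k ↦ v` that solve_alt
-- ever stores satisfies 0 ≤ v < k, so the chain strictly decreases through
-- non-negative values and stops within k steps.
def findC (jump : PySem.Dict Int Int) (path : List Int) (k : Int) (fuel : Nat) :
    Int × PySem.Dict Int Int :=
  match fuel with
  | 0 => (k, path.foldl (fun d v => d.insert v k) jump)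
  | fuel + 1 =>
    match jump.get? k with
    | some v => findC jump (path ++ [k]) v fuel
    | none => (k, path.foldl (fun d v => d.insert v k) jump)

-- B's `for t in arr` loop: jump = popped values, maxpushed = running push maximum.
def altLoop (targets : List Int) (jump : PySem.Dict Int Int) (maxpushed : Int)
    (answer : List String) : List String :=
  match targets with
  | [] => answer
  | t :: rest =>
    if t > maxpushed then
      altLoop rest (jump.insert t (t - 1)) t
        ((answer ++ List.replicate (t - maxpushed).toNat "+") ++ ["-"])
    else
      let fr := findC jump [] maxpushed (maxpushed.toNat + 1)
      if t < 1 ∨ t ≠ fr.1 then ["NO"]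
      else altLoop rest (fr.2.insert t (t - 1)) maxpushed (answer ++ ["-"])

def solve_alt (arr : List Int) : List String := altLoop arr PySem.Dict.empty 0 []

-- ===== PRECONDITION & SPEC =====
def Spec_solve (arr : List Int) (out : List String) : Prop := out = solve_alt arr
instance (arr : List Int) (out : List String) : Decidable (Spec_solve arr out) := by unfold Spec_solve; infer_instance

-- ===== CLAIM (what is proved, stated in full; the proofs are below) =====
def Claim_equal_solve : Prop := ∀ (arr : List Int), Dom_solve arr → Spec_solve arr (solve arr)

-- ===== LEMMAS AND PROOFS =====

-- Proof-layer midpoint: A's loop re-grouped per target (stack-based for-each loop).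
def pushUp (target : Int) (stack : List Int) (answer : List String) (curnum : Int) :
    List Int × List String × Int :=
  if curnum ≤ target then pushUp target (curnum :: stack) (answer ++ ["+"]) (curnum + 1)
  else (stack, answer, curnum)
termination_by (target + 1 - curnum).toNat
decreasing_by omega

def stackLoop (targets : List Int) (stack : List Int) (answer : List String) (curnum : Int) :
    List String :=
  match targets with
  | [] => answer
  | t :: rest =>
    match pushUp t stack answer curnum with
    | (top :: stackRest, answer', curnum') =>
      if top = t then stackLoop rest stackRest (answer' ++ ["-"]) curnum' else ["NO"]
    | ([], _, _) => ["NO"]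

theorem pushUp_stop (target : Int) (stack : List Int) (answer : List String) (curnum : Int)
    (h : ¬ curnum ≤ target) : pushUp target stack answer curnum = (stack, answer, curnum) := by
  rw [pushUp]; simp [h]

theorem pushUp_step (target : Int) (stack : List Int) (answer : List String) (curnum : Int)
    (h : curnum ≤ target) :
    pushUp target stack answer curnum
      = pushUp target (curnum :: stack) (answer ++ ["+"]) (curnum + 1) := by
  rw [pushUp]; simp [h]

theorem stackLoop_cons_cons (t : Int) (rest stack : List Int) (answer : List String)
    (curnum top : Int) (stackRest : List Int) (answer' : List String) (curnum' : Int)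
    (h : pushUp t stack answer curnum = (top :: stackRest, answer', curnum')) :
    stackLoop (t :: rest) stack answer curnum
      = if top = t then stackLoop rest stackRest (answer' ++ ["-"]) curnum' else ["NO"] := by
  rw [stackLoop, h]

theorem stackLoop_cons_nil (t : Int) (rest stack : List Int) (answer : List String)
    (curnum : Int) (answer' : List String) (curnum' : Int)
    (h : pushUp t stack answer curnum = ([], answer', curnum')) :
    stackLoop (t :: rest) stack answer curnum = ["NO"] := by
  rw [stackLoop, h]

theorem stackLoop_push (t : Int) (rest : List Int) (stack : List Int) (answer : List String)
    (curnum : Int) (h : curnum ≤ t) :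
    stackLoop (t :: rest) stack answer curnum
      = stackLoop (t :: rest) (curnum :: stack) (answer ++ ["+"]) (curnum + 1) := by
  simp only [stackLoop, pushUp_step t stack answer curnum h]

-- A's loop from position idx computes the for-each stack loop on the remaining targets.
theorem loop_eq (arr : List Int) (stack : List Int) (answer : List String) (idx : Nat)
    (curnum : Int) (hinv : ∀ x ∈ stack, x < curnum) :
    solveLoop arr stack answer idx curnum = stackLoop (arr.drop idx) stack answer curnum := by
  fun_induction solveLoop arr stack answer idx curnum with
  | case1 answer idx curnum h top rest hne hgt =>
    rw [List.drop_eq_getElem_cons h, stackLoop, pushUp_stop _ _ _ _ (by omega)]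
    simp [hne]
  | case2 answer idx curnum h top rest hne hle ih =>
    rw [List.drop_eq_getElem_cons h, stackLoop_push _ _ _ _ _ (by omega),
      ← List.drop_eq_getElem_cons h]
    refine ih ?_
    intro x hx
    rcases List.mem_cons.mp hx with rfl | h2
    · omega
    · have := hinv x h2; omega
  | case3 answer idx curnum h top rest heq ih =>
    have htop : top < curnum := hinv top (by simp)
    rw [List.drop_eq_getElem_cons h, stackLoop, pushUp_stop _ _ _ _ (by omega)]
    simp only [show top = arr[idx] from by simpa using heq, if_true]
    exact ih (fun x hx => hinv x (by simp [hx]))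
  | case4 answer idx curnum h ih =>
    by_cases hle : curnum ≤ arr[idx]
    · rw [List.drop_eq_getElem_cons h, stackLoop_push _ _ _ _ _ hle,
        ← List.drop_eq_getElem_cons h]
      exact ih (by intro x hx; simp at hx; omega)
    · rw [ih (by intro x hx; simp at hx; omega), List.drop_eq_getElem_cons h, stackLoop,
        pushUp_stop _ _ _ _ (by omega), stackLoop, pushUp_stop _ _ _ _ hle]
      simp
      omega
  | case5 stack answer idx curnum h =>
    rw [List.drop_of_length_le (by omega), stackLoop]

-- ---- invariants relating B's dictionary to A's stack ----

-- every stored entry k ↦ v: 1 ≤ k, 0 ≤ v < k, and everything strictly between is a key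
def Good (jump : PySem.Dict Int Int) : Prop :=
  ∀ k v, jump.get? k = some v →
    1 ≤ k ∧ 0 ≤ v ∧ v < k ∧ ∀ m, v < m → m < k → (jump.get? m).isSome

-- the stack is exactly the strictly-decreasing list of unpopped values in [1, maxpushed]
def Repr' (jump : PySem.Dict Int Int) (maxpushed : Int) (stack : List Int) : Prop :=
  List.IsChain (· > ·) stack ∧
    ∀ x, x ∈ stack ↔ 1 ≤ x ∧ x ≤ maxpushed ∧ jump.get? x = none

def KeysLe (jump : PySem.Dict Int Int) (maxpushed : Int) : Prop :=
  ∀ k v, jump.get? k = some v → k ≤ maxpushed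

theorem get?_foldl_insert (path : List Int) (jump : PySem.Dict Int Int) (r x : Int) :
    (path.foldl (fun d v => d.insert v r) jump).get? x
      = if x ∈ path then some r else jump.get? x := by
  induction path generalizing jump with
  | nil => simp
  | cons p ps ih =>
    simp only [List.foldl_cons, ih, List.mem_cons]
    by_cases hx : x ∈ ps
    · simp [hx]
    · by_cases hxp : x = p <;> simp [hx, hxp, PySem.Dict.get?_insert]

-- full specification of B's find with path compression
theorem findC_spec (fuel : Nat) (jump : PySem.Dict Int Int) (path : List Int) (k : Int)
    (hg : Good jump) (hk : 0 ≤ k) (hfuel : k.toNat + 1 ≤ fuel)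
    (hpath : ∀ v ∈ path, (jump.get? v).isSome = true ∧ k < v ∧
      ∀ m, k < m → m < v → (jump.get? m).isSome = true) :
    ∃ r jump', findC jump path k fuel = (r, jump') ∧
      0 ≤ r ∧ r ≤ k ∧ jump.get? r = none ∧
      (∀ m, r < m → m ≤ k → (jump.get? m).isSome = true) ∧
      (∀ v ∈ path, r < v ∧ ∀ m, r < m → m < v → (jump.get? m).isSome = true) ∧
      (∀ x, (jump'.get? x).isSome = (jump.get? x).isSome) ∧ Good jump' := by
  induction fuel generalizing path k with
  | zero => omega
  | succ fuel ih =>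
    rw [findC]
    cases hget : jump.get? k with
    | none =>
      refine ⟨k, _, rfl, hk, le_refl k, hget, by omega, ?_, ?_, ?_⟩
      · exact fun v hv => ⟨(hpath v hv).2.1, (hpath v hv).2.2⟩
      · intro x
        rw [get?_foldl_insert]
        split
        · next hx => simp [(hpath x hx).1]
        · rfl
      · intro a b hab
        rw [get?_foldl_insert] at hab
        split at hab
        · next ha =>
          obtain ⟨hsome, hlt, hmid⟩ := hpath a ha
          obtain ⟨w, hw⟩ := Option.isSome_iff_exists.mp hsome
          obtain ⟨h1, _, _, _⟩ := hg a w hw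
          cases hab
          refine ⟨h1, hk, hlt, ?_⟩
          intro m h1m h2m
          rw [get?_foldl_insert]
          split
          · rfl
          · exact hmid m h1m h2m
        · obtain ⟨h1, h2, h3, h4⟩ := hg a b hab
          refine ⟨h1, h2, h3, ?_⟩
          intro m h1m h2m
          rw [get?_foldl_insert]
          split
          · rfl
          · exact h4 m h1m h2m
    | some v =>
      obtain ⟨_, hv0, hvk, hmidk⟩ := hg k v hget
      have hnewpath : ∀ x ∈ path ++ [k], (jump.get? x).isSome = true ∧ v < x ∧
          ∀ m, v < m → m < x → (jump.get? m).isSome = true := by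
        intro x hx
        rcases List.mem_append.mp hx with hx | hx
        · obtain ⟨hsome, hlt, hmid⟩ := hpath x hx
          refine ⟨hsome, by omega, ?_⟩
          intro m h1m h2m
          rcases lt_or_ge k m with hkm | hkm
          · exact hmid m hkm h2m
          · rcases eq_or_lt_of_le hkm with heqk | hmk
            · simp [heqk, hget]
            · exact hmidk m h1m hmk
        · simp only [List.mem_singleton] at hx
          subst hx
          exact ⟨by simp [hget], hvk, hmidk⟩
      obtain ⟨r, jump', heq, hr0, hrle, hrnone, hrup, hrpath, hkeys, hg'⟩ :=
        ih (path ++ [k]) v hv0 (by omega) hnewpath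
      refine ⟨r, jump', heq, hr0, by omega, hrnone, ?_, ?_, hkeys, hg'⟩
      · intro m h1m h2m
        rcases lt_or_ge v m with hvm | hvm
        · rcases eq_or_lt_of_le h2m with heqk | hmk
          · simp [heqk, hget]
          · exact hmidk m hvm hmk
        · exact hrup m h1m hvm
      · intro x hx
        exact ⟨(hrpath x (by simp [hx])).1, (hrpath x (by simp [hx])).2⟩

-- Good is preserved by recording a freshly popped value t (entry t ↦ t-1)
theorem good_insert (jump : PySem.Dict Int Int) (t : Int) (ht : 1 ≤ t) (hg : Good jump) :
    Good (jump.insert t (t - 1)) := by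
  intro a b hab
  rw [PySem.Dict.get?_insert] at hab
  split at hab
  · next ha =>
    cases hab
    subst ha
    exact ⟨ht, by omega, by omega, by intro m h1 h2; omega⟩
  · obtain ⟨h1, h2, h3, h4⟩ := hg a b hab
    refine ⟨h1, h2, h3, ?_⟩
    intro m hm1 hm2
    rw [PySem.Dict.get?_insert]
    split
    · rfl
    · exact h4 m hm1 hm2

-- the run of values pushed while counting down from t: [t, t-1, ..., t-n+1]
def decList (n : Nat) (t : Int) : List Int :=
  match n with
  | 0 => []
  | n + 1 => t :: decList n (t - 1)

theorem mem_decList (n : Nat) (t x : Int) : x ∈ decList n t ↔ t - n < x ∧ x ≤ t := by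
  induction n generalizing t with
  | zero => simp [decList]
  | succ n ihn =>
    rw [decList, List.mem_cons, ihn (t - 1)]
    push_cast
    omega

theorem decList_snoc (n : Nat) (t : Int) : decList (n + 1) t = decList n t ++ [t - n] := by
  induction n generalizing t with
  | zero => simp [decList]
  | succ n ihn =>
    rw [decList, ihn (t - 1), decList]
    push_cast
    ring_nf
    simp [List.cons_append]

theorem decList_chain (n : Nat) (t : Int) : List.IsChain (· > ·) (decList n t) := by
  induction n generalizing t with
  | zero => exact List.IsChain.nil
  | succ n ihn =>
    rw [decList, List.isChain_cons]
    refine ⟨?_, ihn (t - 1)⟩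
    intro b hb
    have : b ∈ decList n (t - 1) := List.mem_of_mem_head? hb
    have := (mem_decList n (t - 1) b).mp this
    omega

-- a full run of A's inner push loop
theorem pushUp_run (n : Nat) (t c : Int) (hn : c + n = t + 1) :
    ∀ (stack : List Int) (answer : List String),
    pushUp t stack answer c = (decList n t ++ stack, answer ++ List.replicate n "+", t + 1) := by
  induction n generalizing c with
  | zero =>
    intro stack answer
    rw [pushUp_stop t stack answer c (by omega)]
    simp [decList]
    omega
  | succ n ihn =>
    intro stack answer
    rw [pushUp_step t stack answer c (by omega), ihn (c + 1) (by push_cast at hn ⊢; omega)]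
    have hc : c = t - n := by push_cast at hn; omega
    rw [show (decList n t ++ (c :: stack)) = (decList n t ++ [c]) ++ stack by simp, hc,
      ← decList_snoc]
    simp [List.replicate_succ]

-- every element below the head of a strictly decreasing list is strictly smaller
theorem head_gt_of_chain (top : Int) (rest : List Int)
    (hc : List.IsChain (· > ·) (top :: rest)) : ∀ x ∈ rest, x < top := by
  induction rest generalizing top with
  | nil => intro x hx; simp at hx
  | cons b bs ih =>
    intro x hx
    have h1 := (List.isChain_cons_cons.mp hc).1
    have h2 := (List.isChain_cons_cons.mp hc).2
    rcases List.mem_cons.mp hx with rfl | hx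
    · omega
    · have := ih b h2 x hx; omega

-- head of a strictly decreasing list is its maximum
theorem head_max_of_chain (top : Int) (rest : List Int)
    (hc : List.IsChain (· > ·) (top :: rest)) : ∀ x ∈ top :: rest, x ≤ top := by
  induction rest generalizing top with
  | nil => intro x hx; simp at hx; omega
  | cons b bs ih =>
    intro x hx
    have h1 := (List.isChain_cons_cons.mp hc).1
    have h2 := (List.isChain_cons_cons.mp hc).2
    rcases List.mem_cons.mp hx with rfl | hx
    · exact le_refl x
    · have := ih b h2 x hx; omega

-- the main bridge: stack-based for-each loop = dict-based for-each loop
theorem stack_alt (targets : List Int) (stack : List Int) (jump : PySem.Dict Int Int)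
    (maxpushed : Int) (answer : List String)
    (hg : Good jump) (hkle : KeysLe jump maxpushed) (hrep : Repr' jump maxpushed stack)
    (hm : 0 ≤ maxpushed) :
    stackLoop targets stack answer (maxpushed + 1) = altLoop targets jump maxpushed answer := by
  induction targets generalizing stack jump maxpushed answer with
  | nil => simp [stackLoop, altLoop]
  | cons t rest ih =>
    obtain ⟨hchain, hmem⟩ := hrep
    by_cases htm : maxpushed < t
    · -- the pop of t is preceded by pushing maxpushed+1 .. t
      have hn : (maxpushed + 1) + ((t - maxpushed).toNat : Int) = t + 1 := by omega
      rw [stackLoop, pushUp_run (t - maxpushed).toNat t (maxpushed + 1) hn stack answer]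
      have hn1 : (t - maxpushed).toNat = ((t - maxpushed).toNat - 1) + 1 := by omega
      rw [hn1, decList]
      simp only [List.cons_append]
      rw [altLoop, if_pos htm, ← hn1]
      have harr : (answer ++ List.replicate (t - maxpushed).toNat "+") ++ ["-"]
          = answer ++ List.replicate (t - maxpushed).toNat "+" ++ ["-"] := by
        simp
      rw [harr]
      have ht1 : (1 : Int) ≤ t := by omega
      have hfree : ∀ x, maxpushed < x → jump.get? x = none := by
        intro x hx
        cases hgx : jump.get? x with
        | none => rfl
        | some w => exact absurd (hkle x w hgx) (by omega)
      refine ih (decList ((t - maxpushed).toNat - 1) (t - 1) ++ stack)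
        (jump.insert t (t - 1)) t _ (good_insert jump t ht1 hg) ?_ ⟨?_, ?_⟩ (by omega)
      · intro k v hkv
        rw [PySem.Dict.get?_insert] at hkv
        split at hkv
        · omega
        · have := hkle k v hkv; omega
      · -- chain of the pushed run on top of the old stack
        rw [List.isChain_append]
        refine ⟨decList_chain _ _, hchain, ?_⟩
        intro x hx y hy
        have hxm : x ∈ decList ((t - maxpushed).toNat - 1) (t - 1) :=
          List.mem_of_mem_getLast? hx
        have hym : y ∈ stack := List.mem_of_mem_head? hy
        have h1 := (mem_decList _ _ _).mp hxm
        have h2 := (hmem y).mp hym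
        omega
      · intro x
        rw [List.mem_append, mem_decList, hmem x, PySem.Dict.get?_insert]
        constructor
        · rintro (h | ⟨h1, h2, h3⟩)
          · refine ⟨by omega, by omega, ?_⟩
            rw [if_neg (by omega)]
            exact hfree x (by omega)
          · exact ⟨h1, by omega, by rw [if_neg (by omega)]; exact h3⟩
        · rintro ⟨h1, h2, h3⟩
          split at h3
          · exact absurd h3 (by simp)
          · next hne =>
            rcases lt_or_ge maxpushed x with hxm | hxm
            · left; omega
            · exact Or.inr ⟨h1, hxm, h3⟩
    · -- t ≤ maxpushed: no pushes; B consults find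
      rw [altLoop, if_neg (by omega)]
      obtain ⟨r, jump', heq, hr0, hrle, hrnone, hrup, -, hkeys, hg'⟩ :=
        findC_spec (maxpushed.toNat + 1) jump [] maxpushed hg hm (by omega) (by simp)
      rw [heq]
      cases stack with
      | nil =>
        rw [stackLoop_cons_nil t rest [] answer (maxpushed + 1) answer (maxpushed + 1)
          (pushUp_stop t [] answer (maxpushed + 1) (by omega))]
        -- empty stack: every value in [1, maxpushed] is popped, so r = 0 and B says NO too
        have hr : ¬ (1 ≤ r) := by
          intro h1
          exact absurd ((hmem r).mpr ⟨h1, by omega, hrnone⟩) (List.not_mem_nil)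
        rw [if_pos]
        rcases lt_or_ge t 1 with h | h
        · exact Or.inl h
        · exact Or.inr (by omega)
      | cons top rest' =>
        rw [stackLoop_cons_cons t rest (top :: rest') answer (maxpushed + 1) top rest' answer
          (maxpushed + 1) (pushUp_stop t (top :: rest') answer (maxpushed + 1) (by omega))]
        have htop := (hmem top).mp (List.mem_cons_self)
        have hrt : r = top := by
          have h1 : top ≤ r := by
            by_contra hc
            have := hrup top (by omega) (by omega)
            rw [htop.2.2] at this
            simp at this
          have h2 : r ≤ top := by
            have hrs : r ∈ top :: rest' := (hmem r).mpr ⟨by omega, by omega, hrnone⟩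
            exact head_max_of_chain top rest' hchain r hrs
          omega
        by_cases htt : top = t
        · -- legal pop on both sides
          rw [if_pos htt, if_neg (by omega)]
          refine ih rest' (jump'.insert t (t - 1)) maxpushed _
            (good_insert jump' t (by omega) hg') ?_ ⟨List.IsChain.of_cons hchain, ?_⟩ hm
          · intro k v hkv
            rw [PySem.Dict.get?_insert] at hkv
            split at hkv
            · omega
            · cases hk : jump.get? k with
              | none =>
                have := hkeys k
                rw [hkv, hk] at this
                simp at this
              | some w => exact hkle k w hk
          · intro x
            have hstrict := head_gt_of_chain top rest' hchain
            have hkeq : ∀ y, jump'.get? y = none ↔ jump.get? y = none := by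
              intro y
              have := hkeys y
              cases h1 : jump'.get? y <;> cases h2 : jump.get? y <;>
                simp [h1, h2] at this ⊢
            rw [PySem.Dict.get?_insert]
            constructor
            · intro hx
              have hx' := (hmem x).mp (List.mem_cons_of_mem top hx)
              have hxt : x ≠ t := by have := hstrict x hx; omega
              rw [if_neg hxt, hkeq]
              exact ⟨hx'.1, hx'.2.1, hx'.2.2⟩
            · rintro ⟨h1, h2, h3⟩
              split at h3
              · exact absurd h3 (by simp)
              · next hxt =>
                have hx' : x ∈ top :: rest' := (hmem x).mpr ⟨h1, h2, (hkeq x).mp h3⟩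
                rcases List.mem_cons.mp hx' with rfl | hx'
                · exact absurd htt hxt
                · exact hx'
        · -- A sees a wrong top, B sees t ≠ find(maxpushed)
          rw [if_neg htt, if_pos]
          right
          omega

-- ===== VERDICT (by name: the statement is the Claim_ definition above) =====
theorem solve_spec : Claim_equal_solve := by
  intro arr _
  unfold Spec_solve solve solve_alt
  rw [loop_eq arr [] [] 0 1 (by simp), List.drop_zero]
  have h01 : (1 : Int) = 0 + 1 := by norm_num
  rw [h01]
  refine stack_alt arr [] PySem.Dict.empty 0 [] ?_ ?_ ?_ (le_refl 0)
  · intro k v h; simp at h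
  · intro k v h; simp at h
  · exact ⟨List.IsChain.nil, by intro x; simp; omega⟩
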